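-- pv_equiv track=rewrite | github.com/YoonJunHyeok/PS | 백준/Gold/21608. 상어 초등학교/상어 초등학교.py | get_satisfaction
-- ===== SOURCE A (Python) =====
-- from itertools import product
--
-- dx = [1, 0, -1, 0]
--
-- dy = [0, 1, 0, -1]
--
-- def OOM(N, x, y):
--     if x < 0 or x >= N or y < 0 or y >= N:
--         return True
--     return False
--
-- def get_satisfaction(N, board, like):
--     score = [0, 1, 10, 100, 1000]
--     satisfaction = 0
--
--     for curx, cury in product(range(N), repeat=2):
--         cur_idx = board[curx][cury]
--         cnt = 0
--
--         for dir in range(4):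
--             nx = curx + dx[dir]
--             ny = cury + dy[dir]
--
--             if OOM(N, nx, ny):
--                 continue
--
--             nxt_idx = board[nx][ny]
--
--             if nxt_idx in like[cur_idx]:
--                 cnt += 1
--
--         satisfaction += score[cnt]
--
--     return satisfaction
-- ===== SOURCE B (Python) =====
-- def get_satisfaction(N, board, like):
--     score = [0, 1, 10, 100, 1000]
--     bumps = []
--
--     def edge(ax, ay, bx, by):
--         # one adjacency, both directions (the like relation is directional)
--         if board[bx][by] in like[board[ax][ay]]:
--             bumps.append((ax, ay))
--         if board[ax][ay] in like[board[bx][by]]: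
--             bumps.append((bx, by))
--
--     for x in range(N):
--         for y in range(N):
--             if y + 1 < N:
--                 edge(x, y, x, y + 1)
--             if x + 1 < N:
--                 edge(x, y, x + 1, y)
--
--     counts = {}
--     for pos in bumps:
--         counts[pos] = counts.get(pos, 0) + 1
--
--     total = 0
--     for x in range(N):
--         for y in range(N):
--             total += score[counts.get((x, y), 0)]
--     return total
-- ===== Notes on version B (the rewrite author's own statement) =====
-- stated objective: alternative
-- what changed: Instead of re-checking all four neighbors of every cell, B sweeps each grid adjacency (right/down edge) exactly once, recording directional-like hits for both endpoints in a tally dict, then sums score over the tallied counts.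
import Mathlib
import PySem

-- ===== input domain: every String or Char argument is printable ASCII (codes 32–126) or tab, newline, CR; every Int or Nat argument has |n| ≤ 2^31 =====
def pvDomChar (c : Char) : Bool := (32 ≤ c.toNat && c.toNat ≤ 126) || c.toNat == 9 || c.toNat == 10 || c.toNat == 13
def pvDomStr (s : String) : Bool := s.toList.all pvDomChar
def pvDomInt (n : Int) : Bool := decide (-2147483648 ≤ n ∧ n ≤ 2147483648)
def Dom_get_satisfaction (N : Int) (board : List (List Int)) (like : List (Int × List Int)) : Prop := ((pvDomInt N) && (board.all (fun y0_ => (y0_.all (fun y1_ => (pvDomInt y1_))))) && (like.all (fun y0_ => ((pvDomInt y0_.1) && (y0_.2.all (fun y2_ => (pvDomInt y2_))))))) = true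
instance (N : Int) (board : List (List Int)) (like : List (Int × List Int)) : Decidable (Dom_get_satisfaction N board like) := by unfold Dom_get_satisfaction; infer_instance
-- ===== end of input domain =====

-- B replaces A's per-cell scan of all four neighbours by a single sweep over each
-- right/down adjacency, tallying directional-like hits for both endpoints in a dict
-- (alternative decomposition, same asymptotic cost).

-- ===== PORT A =====
def pv_dx : List Int := [1, 0, -1, 0]
def pv_dy : List Int := [0, 1, 0, -1]

def OOM (N x y : Int) : Bool :=
  if x < 0 ∨ x ≥ N ∨ y < 0 ∨ y ≥ N then true else false

def get_satisfaction (N : Int) (board : List (List Int)) (like : List (Int × List Int)) : Int :=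
  let score : List Int := [0, 1, 10, 100, 1000]
  ((PySem.List.pyRange 0 N 1).flatMap
      (fun curx => (PySem.List.pyRange 0 N 1).map (fun cury => (curx, cury)))).foldl
    (fun satisfaction cur =>
      let cur_idx := PySem.List.pyGetD (PySem.List.pyGetD board cur.1 []) cur.2 0
      let cnt := (PySem.List.pyRange 0 4 1).foldl
        (fun cnt dir =>
          let nx := cur.1 + PySem.List.pyGetD pv_dx dir 0
          let ny := cur.2 + PySem.List.pyGetD pv_dy dir 0
          if OOM N nx ny = true then cnt
          else
            let nxt_idx := PySem.List.pyGetD (PySem.List.pyGetD board nx []) ny 0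
            if nxt_idx ∈ (PySem.Dict.mk like).getD cur_idx [] then cnt + 1 else cnt)
        (0 : Int)
      satisfaction + PySem.List.pyGetD score cnt 0)
    0

-- ===== PORT B =====
-- board[x][y]  (defaults only reachable outside Pre_)
def pvCell (board : List (List Int)) (x y : Int) : Int :=
  PySem.List.pyGetD (PySem.List.pyGetD board x []) y 0

-- b in like[a]
def pvLikes (like : List (Int × List Int)) (a b : Int) : Bool :=
  decide (b ∈ (PySem.Dict.mk like).getD a [])

-- the bump records of one adjacency, both directions (Source B's `edge`)
def pvEdge (board : List (List Int)) (like : List (Int × List Int))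
    (ax ay bx by_ : Int) : List (Int × Int) :=
  (if pvLikes like (pvCell board ax ay) (pvCell board bx by_) then [(ax, ay)] else []) ++
  (if pvLikes like (pvCell board bx by_) (pvCell board ax ay) then [(bx, by_)] else [])

def get_satisfaction_alt (N : Int) (board : List (List Int)) (like : List (Int × List Int)) : Int :=
  let score : List Int := [0, 1, 10, 100, 1000]
  let cells := (PySem.List.pyRange 0 N 1).flatMap
      (fun x => (PySem.List.pyRange 0 N 1).map (fun y => (x, y)))
  let bumps := cells.foldl
    (fun acc p =>
      let acc := if p.2 + 1 < N then acc ++ pvEdge board like p.1 p.2 p.1 (p.2 + 1) else acc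
      if p.1 + 1 < N then acc ++ pvEdge board like p.1 p.2 (p.1 + 1) p.2 else acc)
    []
  let counts := bumps.foldl (fun d pos => d.insert pos (d.getD pos 0 + 1)) PySem.Dict.empty
  cells.foldl (fun total p => total + PySem.List.pyGetD score (counts.getD p 0) 0) 0

-- ===== PRECONDITION & SPEC =====
-- Pre_ excludes exactly the inputs where Python A raises: a board with fewer than N rows
-- or a row of the N×N block shorter than N (IndexError), or — only when N ≥ 2, since at
-- N ≤ 1 no cell has a neighbour and `like` is never consulted — a student in the N×N
-- block that is not a key of `like` (KeyError).
def Pre_get_satisfaction (N : Int) (board : List (List Int)) (like : List (Int × List Int)) : Prop :=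
  (0 < N → N.toNat ≤ board.length ∧ ∀ row ∈ board.take N.toNat, N.toNat ≤ row.length) ∧
  (2 ≤ N → ∀ row ∈ board.take N.toNat,
    ∀ v ∈ row.take N.toNat, (PySem.Dict.mk like).contains v = true)

instance (N : Int) (board : List (List Int)) (like : List (Int × List Int)) : Decidable (Pre_get_satisfaction N board like) := by unfold Pre_get_satisfaction; infer_instance

def pvWitness_get_satisfaction : Int × List (List Int) × (List (Int × List Int)) :=
  (2, [[1, 2], [3, 4]], [(1, [2, 3]), (2, []), (3, [1]), (4, [3])])

def Spec_get_satisfaction (N : Int) (board : List (List Int)) (like : List (Int × List Int)) (out : Int) : Prop := out = get_satisfaction_alt N board like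
instance (N : Int) (board : List (List Int)) (like : List (Int × List Int)) (out : Int) : Decidable (Spec_get_satisfaction N board like out) := by unfold Spec_get_satisfaction; infer_instance

-- ===== CLAIM (what is proved, stated in full; the proofs are below) =====
def Claim_equal_get_satisfaction : Prop := ∀ (N : Int) (board : List (List Int)) (like : List (Int × List Int)), Dom_get_satisfaction N board like → Pre_get_satisfaction N board like → Spec_get_satisfaction N board like (get_satisfaction N board like)

-- ===== LEMMAS AND PROOFS =====

-- the row-major cell list both ports loop over
def pvCells (N : Int) : List (Int × Int) :=
  (PySem.List.pyRange 0 N 1).flatMap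
    (fun x => (PySem.List.pyRange 0 N 1).map (fun y => (x, y)))

-- all bump records produced while processing one cell
def pvG (N : Int) (board : List (List Int)) (like : List (Int × List Int))
    (p : Int × Int) : List (Int × Int) :=
  (if p.2 + 1 < N then pvEdge board like p.1 p.2 p.1 (p.2 + 1) else []) ++
  (if p.1 + 1 < N then pvEdge board like p.1 p.2 (p.1 + 1) p.2 else [])

-- the four directional indicators A accumulates at an in-range cell
def pvCntA (N : Int) (board : List (List Int)) (like : List (Int × List Int))
    (x y : Int) : Int :=
  (if x + 1 < N then (if pvLikes like (pvCell board x y) (pvCell board (x + 1) y) then (1:Int) else 0) else 0) +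
  (if y + 1 < N then (if pvLikes like (pvCell board x y) (pvCell board x (y + 1)) then (1:Int) else 0) else 0) +
  (if 1 ≤ x then (if pvLikes like (pvCell board x y) (pvCell board (x - 1) y) then (1:Int) else 0) else 0) +
  (if 1 ≤ y then (if pvLikes like (pvCell board x y) (pvCell board x (y - 1)) then (1:Int) else 0) else 0)

lemma pv_countG_self (N : Int) (board : List (List Int)) (like : List (Int × List Int))
    (x y : Int) :
    ((pvG N board like (x, y)).count (x, y) : Int)
      = (if y + 1 < N then (if pvLikes like (pvCell board x y) (pvCell board x (y + 1)) then (1:Int) else 0) else 0)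
      + (if x + 1 < N then (if pvLikes like (pvCell board x y) (pvCell board (x + 1) y) then (1:Int) else 0) else 0) := by
  simp only [pvG, pvEdge, List.count_append]
  split_ifs <;> simp_all [Prod.ext_iff]

lemma pv_countG_left (N : Int) (board : List (List Int)) (like : List (Int × List Int))
    (x y : Int) (hyN : y < N) :
    ((pvG N board like (x, y - 1)).count (x, y) : Int)
      = (if pvLikes like (pvCell board x y) (pvCell board x (y - 1)) then (1:Int) else 0) := by
  simp only [pvG, pvEdge, List.count_append]
  have h1 : y - 1 + 1 = y := by omega
  rw [h1]
  split_ifs <;> simp_all [Prod.ext_iff]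

lemma pv_countG_up (N : Int) (board : List (List Int)) (like : List (Int × List Int))
    (x y : Int) (hxN : x < N) :
    ((pvG N board like (x - 1, y)).count (x, y) : Int)
      = (if pvLikes like (pvCell board x y) (pvCell board (x - 1) y) then (1:Int) else 0) := by
  simp only [pvG, pvEdge, List.count_append]
  have h1 : x - 1 + 1 = x := by omega
  rw [h1]
  split_ifs <;> simp_all [Prod.ext_iff]

lemma pv_countG_zero (N : Int) (board : List (List Int)) (like : List (Int × List Int))
    (x y : Int) (p : Int × Int)
    (h1 : p ≠ (x, y)) (h2 : p ≠ (x, y - 1)) (h3 : p ≠ (x - 1, y)) :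
    (pvG N board like p).count (x, y) = 0 := by
  obtain ⟨a, b⟩ := p
  simp only [pvG, pvEdge, List.count_append]
  split_ifs <;> simp_all [List.count_cons, List.count_nil, beq_iff_eq, Prod.mk.injEq] <;> omega

lemma pv_sum_flatMap {α : Type} (l : List α) (f : α → List Int) :
    (l.flatMap f).sum = (l.map (fun a => (f a).sum)).sum := by
  induction l with
  | nil => rfl
  | cons a t ih => simp [List.flatMap_cons, List.sum_append, ih]

-- 1-D: support ⊆ {y-1, y}
lemma pv_sum_support_two (n : Nat) (g : Int → Int) (y : Int) (h0 : 0 ≤ y) (hn : y < (n : Int))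
    (hz : ∀ k : Nat, k < n → (k : Int) ≠ y → (k : Int) ≠ y - 1 → g k = 0) :
    ((List.range n).map (fun k : Nat => g (k : Int))).sum = (if 1 ≤ y then g (y - 1) else 0) + g y := by
  have hbase : ((List.range n).map (fun k : Nat => g (k : Int))).sum = ∑ i ∈ Finset.range n, g i := rfl
  rw [hbase]
  by_cases hy1 : 1 ≤ y
  · rw [if_pos hy1]
    have := Finset.sum_eq_add (s := Finset.range n) (f := fun i : Nat => g i)
      ((y - 1).toNat) (y.toNat) (by omega)
      (by intro c hc ⟨hc1, hc2⟩; exact hz c (Finset.mem_range.mp hc) (by omega) (by omega))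
      (by intro h; exact absurd (Finset.mem_range.mpr (by omega)) h)
      (by intro h; exact absurd (Finset.mem_range.mpr (by omega)) h)
    rw [this]
    simp only [Int.toNat_of_nonneg (show (0:Int) ≤ y - 1 by omega), Int.toNat_of_nonneg h0]
  · rw [if_neg hy1]
    have hy0 : y = 0 := by omega
    have := Finset.sum_eq_single (s := Finset.range n) (f := fun i : Nat => g i) (y.toNat)
      (by intro c hc hcy; exact hz c (Finset.mem_range.mp hc) (by omega) (by omega))
      (by intro h; exact absurd (Finset.mem_range.mpr (by omega)) h)
    rw [this]
    simp only [Int.toNat_of_nonneg h0]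
    omega

-- 1-D: support ⊆ {y}
lemma pv_sum_support_one (n : Nat) (g : Int → Int) (y : Int) (h0 : 0 ≤ y) (hn : y < (n : Int))
    (hz : ∀ k : Nat, k < n → (k : Int) ≠ y → g k = 0) :
    ((List.range n).map (fun k : Nat => g (k : Int))).sum = g y := by
  have hbase : ((List.range n).map (fun k : Nat => g (k : Int))).sum = ∑ i ∈ Finset.range n, g i := rfl
  rw [hbase]
  have := Finset.sum_eq_single (s := Finset.range n) (f := fun i : Nat => g i) (y.toNat)
    (by intro c hc hcy; exact hz c (Finset.mem_range.mp hc) (by omega))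
    (by intro h; exact absurd (Finset.mem_range.mpr (by omega)) h)
  rw [this]
  simp only [Int.toNat_of_nonneg h0]



lemma pv_sum_cells (N : Int) (n : Nat) (hN : N = (n : Int)) (h : Int × Int → Int) :
    ((pvCells N).map h).sum
      = ((List.range n).map (fun a : Nat =>
          ((List.range n).map (fun b : Nat => h ((a : Int), (b : Int)))).sum)).sum := by
  rw [pvCells, hN, PySem.List.pyRange_zero_natCast]
  rw [List.map_flatMap, pv_sum_flatMap]
  simp [List.map_map, Function.comp_def]

lemma pv_count_bumps (N : Int) (board : List (List Int)) (like : List (Int × List Int))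
    (x y : Int) (hx0 : 0 ≤ x) (hxN : x < N) (hy0 : 0 ≤ y) (hyN : y < N) :
    (((pvCells N).flatMap (pvG N board like)).count (x, y) : Int)
      = pvCntA N board like x y := by
  have hN : N = ((N.toNat : Nat) : Int) := by omega
  set n := N.toNat with hn
  rw [List.count_flatMap]
  rw [Nat.cast_list_sum, List.map_map]
  rw [pv_sum_cells N n hN]
  simp only [Function.comp_apply]
  -- inner sum for row x
  have hinner_x :
      ((List.range n).map (fun b : Nat =>
        (((pvG N board like ((x : Int), (b : Int))).count (x, y) : Int)))).sum
      = (if 1 ≤ y then (if pvLikes like (pvCell board x y) (pvCell board x (y - 1)) then (1:Int) else 0) else 0)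
        + ((if y + 1 < N then (if pvLikes like (pvCell board x y) (pvCell board x (y + 1)) then (1:Int) else 0) else 0)
        + (if x + 1 < N then (if pvLikes like (pvCell board x y) (pvCell board (x + 1) y) then (1:Int) else 0) else 0)) := by
    have hz : ∀ k : Nat, k < n → (k : Int) ≠ y → (k : Int) ≠ y - 1 →
        (((pvG N board like ((x : Int), (k : Int))).count (x, y) : Int)) = 0 := by
      intro k hk h1 h2
      rw [pv_countG_zero N board like x y ((x : Int), (k : Int))
        (by simp [Prod.ext_iff] <;> omega) (by simp [Prod.ext_iff] <;> omega)
        (by simp [Prod.ext_iff] <;> omega)]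
      rfl
    have hs := pv_sum_support_two n
      (fun t : Int => (((pvG N board like ((x : Int), t)).count (x, y) : Int)))
      y hy0 (by omega) hz
    rw [hs]
    beta_reduce
    by_cases h1y : 1 ≤ y
    · rw [if_pos h1y, if_pos h1y, pv_countG_left N board like x y hyN,
        pv_countG_self N board like x y]
    · rw [if_neg h1y, if_neg h1y, zero_add, zero_add, pv_countG_self N board like x y]
  -- inner sum for row x-1
  have hinner_up : 1 ≤ x →
      ((List.range n).map (fun b : Nat =>
        (((pvG N board like (x - 1, (b : Int))).count (x, y) : Int)))).sum
      = (if pvLikes like (pvCell board x y) (pvCell board (x - 1) y) then (1:Int) else 0) := by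
    intro h1x
    have hz : ∀ k : Nat, k < n → (k : Int) ≠ y →
        (((pvG N board like (x - 1, (k : Int))).count (x, y) : Int)) = 0 := by
      intro k hk h1
      rw [pv_countG_zero N board like x y (x - 1, (k : Int))
        (by simp [Prod.ext_iff] <;> omega) (by simp [Prod.ext_iff] <;> omega)
        (by simp [Prod.ext_iff] <;> omega)]
      rfl
    have hs := pv_sum_support_one n
      (fun t : Int => (((pvG N board like (x - 1, t)).count (x, y) : Int)))
      y hy0 (by omega) hz
    rw [hs]
    beta_reduce
    rw [pv_countG_up N board like x y hxN]
  -- zero rows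
  have hzrow : ∀ k : Nat, k < n → (k : Int) ≠ x → (k : Int) ≠ x - 1 →
      ((List.range n).map (fun b : Nat =>
        (((pvG N board like ((k : Int), (b : Int))).count (x, y) : Int)))).sum = 0 := by
    intro k hk h1 h2
    apply List.sum_eq_zero
    intro z hz
    obtain ⟨b, _, rfl⟩ := List.mem_map.mp hz
    rw [pv_countG_zero N board like x y ((k : Int), (b : Int))
      (by simp [Prod.ext_iff] <;> omega) (by simp [Prod.ext_iff] <;> omega)
      (by simp [Prod.ext_iff] <;> omega)]
    rfl
  have hs := pv_sum_support_two n
    (fun t : Int => ((List.range n).map (fun b : Nat =>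
      (((pvG N board like (t, (b : Int))).count (x, y) : Int)))).sum)
    x hx0 (by omega) hzrow
  rw [hs]
  beta_reduce
  rw [hinner_x]
  by_cases h1x : 1 ≤ x
  · rw [if_pos h1x, hinner_up h1x, pvCntA]
    simp only [if_pos h1x]
    ring
  · rw [if_neg h1x, pvCntA]
    simp only [if_neg h1x]
    ring

set_option maxHeartbeats 1000000 in
lemma pv_innerA_eq (N : Int) (board : List (List Int)) (like : List (Int × List Int))
    (x y : Int) (hx0 : 0 ≤ x) (hxN : x < N) (hy0 : 0 ≤ y) (hyN : y < N) :
    (PySem.List.pyRange 0 4 1).foldl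
        (fun cnt dir =>
          let nx := x + PySem.List.pyGetD pv_dx dir 0
          let ny := y + PySem.List.pyGetD pv_dy dir 0
          if OOM N nx ny = true then cnt
          else
            let nxt_idx := PySem.List.pyGetD (PySem.List.pyGetD board nx []) ny 0
            if nxt_idx ∈ (PySem.Dict.mk like).getD (pvCell board x y) [] then cnt + 1 else cnt)
        (0 : Int)
      = pvCntA N board like x y := by
  have hr : PySem.List.pyRange 0 4 1 = [0, 1, 2, 3] := by decide
  rw [hr]
  simp only [List.foldl_cons, List.foldl_nil]
  simp only [show PySem.List.pyGetD pv_dx 0 0 = 1 from by decide,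
    show PySem.List.pyGetD pv_dx 1 0 = 0 from by decide,
    show PySem.List.pyGetD pv_dx 2 0 = -1 from by decide,
    show PySem.List.pyGetD pv_dx 3 0 = 0 from by decide,
    show PySem.List.pyGetD pv_dy 0 0 = 0 from by decide,
    show PySem.List.pyGetD pv_dy 1 0 = 1 from by decide,
    show PySem.List.pyGetD pv_dy 2 0 = 0 from by decide,
    show PySem.List.pyGetD pv_dy 3 0 = -1 from by decide]
  have od : (OOM N (x+1) y = true) ↔ ¬ (x+1 < N) := by simp [OOM]; omega
  have orr : (OOM N x (y+1) = true) ↔ ¬ (y+1 < N) := by simp [OOM]; omega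
  have ou : (OOM N (x-1) y = true) ↔ ¬ (1 ≤ x) := by simp [OOM]; omega
  have ol : (OOM N x (y-1) = true) ↔ ¬ (1 ≤ y) := by simp [OOM]; omega
  simp only [add_zero, ← sub_eq_add_neg]
  simp only [od, orr, ou, ol, pvCntA, pvLikes, decide_eq_true_eq, pvCell]
  split_ifs <;> omega

lemma pv_mem_cells {N : Int} {p : Int × Int} (h : p ∈ pvCells N) :
    0 ≤ p.1 ∧ p.1 < N ∧ 0 ≤ p.2 ∧ p.2 < N := by
  simp only [pvCells, List.mem_flatMap, List.mem_map, PySem.List.mem_pyRange_one] at h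
  obtain ⟨a, ⟨ha1, ha2⟩, b, ⟨hb1, hb2⟩, rfl⟩ := h
  exact ⟨ha1, ha2, hb1, hb2⟩

theorem pv_main (N : Int) (board : List (List Int)) (like : List (Int × List Int)) :
    get_satisfaction N board like = get_satisfaction_alt N board like := by
  simp only [get_satisfaction, get_satisfaction_alt]
  have hbumps : (pvCells N).foldl
      (fun acc p =>
        let acc' := if p.2 + 1 < N then acc ++ pvEdge board like p.1 p.2 p.1 (p.2 + 1) else acc
        if p.1 + 1 < N then acc' ++ pvEdge board like p.1 p.2 (p.1 + 1) p.2 else acc')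
      [] = (pvCells N).flatMap (pvG N board like) := by
    rw [PySem.List.foldl_congr_mem (pvCells N) _ (fun acc p => acc ++ pvG N board like p) []
      (by intro acc p _; simp only [pvG]; split_ifs <;> simp [List.append_assoc])]
    rw [PySem.List.foldl_append_eq_flatMap]
    rfl
  rw [show ((PySem.List.pyRange 0 N 1).flatMap
      (fun x => (PySem.List.pyRange 0 N 1).map (fun y => (x, y)))) = pvCells N from rfl]
  rw [hbumps]
  rw [PySem.List.foldl_add, PySem.List.foldl_add, zero_add, zero_add]
  congr 1
  apply List.map_congr_left
  intro p hp
  obtain ⟨h1, h2, h3, h4⟩ := pv_mem_cells hp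
  obtain ⟨px, py⟩ := p
  simp only at h1 h2 h3 h4 ⊢
  congr 1
  rw [PySem.Dict.getD_foldl_insert_add_one, PySem.Dict.getD_empty, zero_add]
  rw [pv_count_bumps N board like px py h1 h2 h3 h4]
  rw [show PySem.List.pyGetD (PySem.List.pyGetD board px []) py 0 = pvCell board px py from rfl]
  rw [pv_innerA_eq N board like px py h1 h2 h3 h4]

-- ===== VERDICT (by name: the statement is the Claim_ definition above) =====
theorem get_satisfaction_spec : Claim_equal_get_satisfaction := by
  intro N board like _ _
  exact pv_main N board like
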